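-- pv_equiv track=rewrite | github.com/tianzesun/CodeProvenance | src/backend/engines/mvp/normalization.py | kgrams
-- ===== SOURCE A (Python) =====
-- from typing import Dict, Iterable, List
--
-- def kgrams(tokens: Iterable[str], k: int = 5) -> List[tuple[str, ...]]:
--     """Build ordered k-grams from a normalized token stream."""
--     token_list = list(tokens)
--     if k <= 0:
--         raise ValueError("k must be positive")
--     if len(token_list) < k:
--         return [tuple(token_list)] if token_list else []
--     return [
--         tuple(token_list[index : index + k])
--         for index in range(len(token_list) - k + 1)
--     ]
-- ===== SOURCE B (Python) =====
-- from collections import deque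
--
-- def kgrams(tokens, k=5):
--     """Build ordered k-grams via a single-pass sliding window."""
--     token_list = list(tokens)
--     if k <= 0:
--         raise ValueError("k must be positive")
--     if len(token_list) < k:
--         return [tuple(token_list)] if token_list else []
--     window = deque(maxlen=k)
--     out = []
--     for tok in token_list:
--         window.append(tok)
--         if len(window) == k:
--             out.append(tuple(window))
--     return out
-- ===== Notes on version B (the rewrite author's own statement) =====
-- stated objective: idiomatic
-- what changed: Replaced the per-index slicing comprehension with a single-pass sliding window (collections.deque with maxlen=k) that emits a tuple each time the window is full.
import Mathlib
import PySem

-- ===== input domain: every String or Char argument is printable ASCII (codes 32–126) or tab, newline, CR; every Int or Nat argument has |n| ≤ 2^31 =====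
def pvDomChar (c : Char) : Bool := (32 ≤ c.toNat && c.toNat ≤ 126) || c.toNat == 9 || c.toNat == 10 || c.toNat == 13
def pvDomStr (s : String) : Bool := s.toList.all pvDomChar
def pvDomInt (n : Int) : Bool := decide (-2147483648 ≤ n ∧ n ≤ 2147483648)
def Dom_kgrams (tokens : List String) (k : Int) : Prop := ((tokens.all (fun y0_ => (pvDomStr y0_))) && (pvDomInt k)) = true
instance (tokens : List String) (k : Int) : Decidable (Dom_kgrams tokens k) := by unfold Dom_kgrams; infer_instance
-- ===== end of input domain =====

-- B replaces A's per-index slicing comprehension by a one-pass sliding window (deque); same results, idiomatic single traversal.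

-- ===== PORT A =====
-- literal port of A: ValueError branch (k ≤ 0) is excluded by Pre_kgrams
def kgrams (tokens : List String) (k : Int) : List (List String) :=
  let tl := tokens
  if k ≤ 0 then []  -- raise ValueError: outside Pre_kgrams
  else if (tl.length : Int) < k then (if tl.isEmpty then [] else [tl])
  else (PySem.List.pyRange 0 ((tl.length : Int) - k + 1) 1).map
    (fun index => PySem.List.slice tl (some index) (some (index + k)))

-- ===== PORT B =====
-- one step of Source B's loop: push tok into the maxlen-k deque, emit when full
def kgramsStep (k : Int) (s : List String × List (List String)) (tok : String) :
    List String × List (List String) :=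
  let w0 := s.1 ++ [tok]
  let w := if (k : Int) < (w0.length : Int) then w0.drop 1 else w0  -- deque(maxlen=k) eviction
  if (w.length : Int) = k then (w, s.2 ++ [w]) else (w, s.2)

def kgrams_alt (tokens : List String) (k : Int) : List (List String) :=
  let tl := tokens
  if k ≤ 0 then []  -- raise ValueError: outside Pre_kgrams
  else if (tl.length : Int) < k then (if tl.isEmpty then [] else [tl])
  else (tl.foldl (kgramsStep k) ([], [])).2

-- ===== PRECONDITION & SPEC =====
-- Pre_ excludes exactly k ≤ 0, where the Python raises ValueError.
def Pre_kgrams (tokens : List String) (k : Int) : Prop := 1 ≤ k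
instance (tokens : List String) (k : Int) : Decidable (Pre_kgrams tokens k) := by unfold Pre_kgrams; infer_instance
def pvWitness_kgrams : List String × Int := (["a", "b", "c"], 2)

def Spec_kgrams (tokens : List String) (k : Int) (out : List (List String)) : Prop := out = kgrams_alt tokens k
instance (tokens : List String) (k : Int) (out : List (List String)) : Decidable (Spec_kgrams tokens k out) := by unfold Spec_kgrams; infer_instance

-- ===== CLAIM (what is proved, stated in full; the proofs are below) =====
def Claim_equal_kgrams : Prop := ∀ (tokens : List String) (k : Int), Dom_kgrams tokens k → Pre_kgrams tokens k → Spec_kgrams tokens k (kgrams tokens k)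

-- ===== LEMMAS AND PROOFS =====

-- Filling phase: while the window has not yet reached k elements, the loop only appends;
-- the single emission happens exactly when the k-th token arrives.
theorem kgrams_fill (kn : Nat) (ts : List String) :
    ∀ (w : List String) (acc : List (List String)), w.length + ts.length = kn → ts ≠ [] →
    ts.foldl (kgramsStep (kn : Int)) (w, acc) = (w ++ ts, acc ++ [w ++ ts]) := by
  induction ts with
  | nil => intro _ _ _ h; exact absurd rfl h
  | cons t ts ih =>
    intro w acc hlen _
    simp only [List.length_cons, List.length_nil] at hlen
    have hwt : (w ++ [t]).length = w.length + 1 := by simp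
    simp only [List.foldl_cons, kgramsStep]
    cases ts with
    | nil =>
      simp only [List.length_nil] at hlen
      have h1 : ¬ ((kn : Int) < ((w ++ [t]).length : Int)) := by
        rw [hwt]; push_cast; omega
      have h2 : (((w ++ [t]).length : Int)) = (kn : Int) := by
        rw [hwt]; push_cast; omega
      rw [if_neg h1, if_pos h2]
      simp
    | cons t2 ts2 =>
      simp only [List.length_cons] at hlen
      have h1 : ¬ ((kn : Int) < ((w ++ [t]).length : Int)) := by
        rw [hwt]; push_cast; omega
      have h2 : ¬ (((w ++ [t]).length : Int) = (kn : Int)) := by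
        rw [hwt]; push_cast; omega
      rw [if_neg h1, if_neg h2]
      rw [ih (w ++ [t]) acc (by simp only [List.length_append, List.length_cons, List.length_nil]; omega) (by simp)]
      simp

-- Full phase: once the window holds exactly k elements, every step evicts the oldest
-- token, appends the new one and emits the window, producing one k-gram per token.
theorem kgrams_full (kn : Nat) (rest : List String) :
    ∀ (w : List String) (acc : List (List String)), w.length = kn → w ≠ [] →
    (rest.foldl (kgramsStep (kn : Int)) (w, acc)).2
      = acc ++ (List.range rest.length).map (fun i => ((w.tail ++ rest).drop i).take kn) := by
  induction rest with
  | nil => intro w acc _ _; simp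
  | cons t rest ih =>
    intro w acc hw hwne
    obtain ⟨x, w', rfl⟩ := List.exists_cons_of_ne_nil hwne
    simp only [List.length_cons] at hw
    have hgt : ((kn : Int) < ((x :: w' ++ [t]).length : Int)) := by
      simp only [List.length_append, List.length_cons, List.length_nil]; push_cast; omega
    have hdrop : (x :: w' ++ [t]).drop 1 = w' ++ [t] := by simp
    have hlen' : (w' ++ [t]).length = kn := by simp only [List.length_append, List.length_cons, List.length_nil]; omega
    have heq : (((w' ++ [t]).length : Int)) = (kn : Int) := by exact_mod_cast hlen'
    simp only [List.foldl_cons, kgramsStep, if_pos hgt, hdrop, if_pos heq]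
    rw [ih (w' ++ [t]) (acc ++ [w' ++ [t]]) hlen' (by simp)]
    rw [List.length_cons, List.range_succ_eq_map]
    simp only [List.map_cons, List.map_map, List.append_assoc]
    congr 1
    simp only [List.singleton_append]
    congr 1
    · rw [List.drop_zero, List.tail_cons]
      have hsplit : w' ++ t :: rest = (w' ++ [t]) ++ rest := by simp
      rw [hsplit, List.take_append_of_le_length (le_of_eq hlen'.symm),
        List.take_of_length_le (le_of_eq hlen')]
    · apply List.map_congr_left
      intro i _
      have h3 : (w' ++ [t]).tail ++ rest = ((w' ++ [t]) ++ rest).drop 1 := by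
        rw [List.drop_append_of_le_length (by simp), List.drop_one]
      have h4 : (w' ++ [t]) ++ rest = w' ++ t :: rest := by simp
      rw [h3, List.drop_drop, h4]
      simp only [Function.comp_apply, List.tail_cons]
      rw [Nat.add_comm]

-- A's comprehension of slices, as a map over natural indices.
theorem kgrams_A_eq (tokens : List String) (kn : Nat) (h1 : 1 ≤ kn) (h2 : kn ≤ tokens.length) :
    kgrams tokens (kn : Int)
      = (List.range (tokens.length - kn + 1)).map (fun j => (tokens.drop j).take kn) := by
  have hk0 : ¬ ((kn : Int) ≤ 0) := by omega
  have hlt : ¬ ((tokens.length : Int) < (kn : Int)) := by exact_mod_cast Nat.not_lt.mpr h2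
  unfold kgrams
  simp only [if_neg hk0, if_neg hlt]
  rw [PySem.List.pyRange_one]
  rw [List.map_map]
  have hcnt : (((tokens.length : Int) - kn + 1) - 0).toNat = tokens.length - kn + 1 := by omega
  rw [hcnt]
  apply List.map_congr_left
  intro j _
  simp only [Function.comp_apply, zero_add]
  exact PySem.List.slice_natCast_add tokens j kn

-- B's sliding window, split into the filling phase and the full phase.
theorem kgrams_B_eq (tokens : List String) (kn : Nat) (h1 : 1 ≤ kn) (h2 : kn ≤ tokens.length) :
    kgrams_alt tokens (kn : Int)
      = (List.range (tokens.length - kn + 1)).map (fun j => (tokens.drop j).take kn) := by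
  have hk0 : ¬ ((kn : Int) ≤ 0) := by omega
  have hlt : ¬ ((tokens.length : Int) < (kn : Int)) := by exact_mod_cast Nat.not_lt.mpr h2
  unfold kgrams_alt
  simp only [if_neg hk0, if_neg hlt]
  have htl : (tokens.take kn).length = kn := by rw [List.length_take]; omega
  have htne : tokens.take kn ≠ [] := by
    intro h; rw [h] at htl; simp at htl; omega
  conv_lhs => rw [← List.take_append_drop kn tokens, List.foldl_append]
  rw [kgrams_fill kn (tokens.take kn) [] [] (by simp [htl]) htne]
  simp only [List.nil_append]
  rw [kgrams_full kn (tokens.drop kn) (tokens.take kn) [tokens.take kn] htl htne]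
  have htail : (tokens.take kn).tail ++ tokens.drop kn = tokens.drop 1 := by
    conv_rhs => rw [← List.take_append_drop kn tokens]
    rw [List.drop_append_of_le_length (by omega), List.drop_one]
  rw [htail, List.length_drop]
  have hrs : tokens.length - kn + 1 = (tokens.length - kn) + 1 := rfl
  rw [hrs, List.range_succ_eq_map, List.map_cons, List.map_map, List.drop_zero,
    List.singleton_append]
  congr 1
  apply List.map_congr_left
  intro i _
  simp only [Function.comp_apply, List.drop_drop]
  rw [Nat.add_comm]

-- ===== VERDICT (by name: the statement is the Claim_ definition above) =====
theorem kgrams_spec : Claim_equal_kgrams := by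
  intro tokens k _ hpre
  have hk : 1 ≤ k := hpre
  have hkcast : ((k.toNat : Nat) : Int) = k := Int.toNat_of_nonneg (by omega)
  unfold Spec_kgrams
  by_cases hlt : ((tokens.length : Int) < k)
  · have hk0 : ¬ (k ≤ 0) := by omega
    unfold kgrams kgrams_alt
    simp only [if_neg hk0, if_pos hlt]
  · have h2 : k.toNat ≤ tokens.length := by omega
    have h1 : 1 ≤ k.toNat := by omega
    rw [← hkcast, kgrams_A_eq tokens k.toNat h1 h2, kgrams_B_eq tokens k.toNat h1 h2]
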